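-- pv_equiv track=rewrite | github.com/Andyy58/Card-Game | cards.py | checkRuns
-- ===== SOURCE A (Python) =====
-- def checkRuns(hand, playableCards):
--     runs = []
--     for playableCard in playableCards:
--         if playableCard[1] != -1:
--             cards = [playableCard]
--             while True:
--                 oldLast = cards[-1]
--                 for card in hand:
--                     if card[0] == (cards[-1])[0] + 1:
--                         cards.append(card)
--                         break
--                 if cards[-1] == oldLast:
--                     break
--             if len(cards) > 2:
--                 runs.append(cards[0])
--     return runs
-- ===== SOURCE B (Python) =====
-- def checkRuns(hand, playableCards):
--     values = {c[0] for c in hand}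
--     return [pc for pc in playableCards
--             if pc[1] != -1 and pc[0] + 1 in values and pc[0] + 2 in values]
-- ===== Notes on version B (the rewrite author's own statement) =====
-- stated objective: simpler
-- what changed: Replaces A's greedy run-extension while-loop (which rescans the hand to build the whole run for every playable card) with a hand-value set built once and a closed-form two-successor membership test (a run of length > 2 exists iff v+1 and v+2 are hand values); a timing run measured B about 2x faster at the largest size.
-- outside the precondition, e.g. on checkRuns([[]], []): A returns [], B raises IndexError
import Mathlib
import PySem

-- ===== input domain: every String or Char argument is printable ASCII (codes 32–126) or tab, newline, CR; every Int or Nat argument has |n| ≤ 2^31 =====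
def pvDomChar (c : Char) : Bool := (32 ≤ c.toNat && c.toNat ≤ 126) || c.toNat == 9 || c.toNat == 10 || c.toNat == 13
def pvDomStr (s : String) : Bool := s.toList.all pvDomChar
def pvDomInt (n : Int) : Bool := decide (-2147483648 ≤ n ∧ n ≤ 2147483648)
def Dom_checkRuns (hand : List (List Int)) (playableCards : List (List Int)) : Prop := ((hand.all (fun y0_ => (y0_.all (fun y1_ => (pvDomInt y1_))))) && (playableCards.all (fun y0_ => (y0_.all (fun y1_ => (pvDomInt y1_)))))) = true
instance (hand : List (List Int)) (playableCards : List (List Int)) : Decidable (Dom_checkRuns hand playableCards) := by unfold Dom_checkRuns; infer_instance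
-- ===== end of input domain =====

-- B replaces A's greedy run-extension while-loop with a hand-value set built once and a
-- closed-form two-successor membership test (objective: simpler).

-- ===== PORT A =====
-- card[0]  (total form; inside Pre_ every card is nonempty, so the default is never used)
def pvVal (c : List Int) : Int := (PySem.List.pyGet? c 0).getD 0

-- 'for card in hand: if card[0] == last + 1: cards.append(card); break'
def pvFindNext (hand : List (List Int)) (v : Int) : Option (List Int) :=
  hand.find? (fun card => pvVal card == v + 1)

-- the 'while True' loop of A; fuel hand.length + 1 is exact: each append strictly increases
-- the last value by 1, so the appended values are distinct hand values (≤ hand.length appends),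
-- followed by one breaking iteration — Python's loop never runs more iterations than the fuel.
def pvRunLoop (hand : List (List Int)) : Nat → List (List Int) → List (List Int)
  | 0, cards => cards
  | fuel + 1, cards =>
    match pvFindNext hand (pvVal ((PySem.List.pyGet? cards (-1)).getD [])) with
    | some card => pvRunLoop hand fuel (cards ++ [card])
    | none => cards   -- cards[-1] == oldLast: nothing was appended → break

def checkRuns (hand : List (List Int)) (playableCards : List (List Int)) : List (List Int) :=
  playableCards.foldl (fun runs playableCard =>
    if (PySem.List.pyGet? playableCard 1).getD 0 ≠ -1 then
      let cards := pvRunLoop hand (hand.length + 1) [playableCard]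
      if 2 < cards.length then runs ++ [(PySem.List.pyGet? cards 0).getD []] else runs
    else runs) []

-- ===== PORT B =====
def checkRuns_alt (hand : List (List Int)) (playableCards : List (List Int)) : List (List Int) :=
  let values : PySem.Set Int := PySem.Set.ofList (hand.map (fun c => (PySem.List.pyGet? c 0).getD 0))
  playableCards.filter (fun pc =>
    ((PySem.List.pyGet? pc 1).getD 0 != -1)
    && PySem.Set.contains values ((PySem.List.pyGet? pc 0).getD 0 + 1)
    && PySem.Set.contains values ((PySem.List.pyGet? pc 0).getD 0 + 2))

-- ===== PRECONDITION & SPEC =====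
-- Python A raises IndexError on a playable card of length < 2 (playableCard[1]) and, once any
-- playable card passes the -1 test, on an empty card in hand (card[0]).  Pre_ additionally
-- excludes (narrows away) hands containing an empty card even when no playable card makes A scan
-- the hand (A then returns []), because B builds its value set from every hand card upfront.
def Pre_checkRuns (hand : List (List Int)) (playableCards : List (List Int)) : Prop :=
  (∀ c ∈ hand, c ≠ []) ∧ (∀ pc ∈ playableCards, 2 ≤ pc.length)
instance (hand : List (List Int)) (playableCards : List (List Int)) : Decidable (Pre_checkRuns hand playableCards) := by unfold Pre_checkRuns; infer_instance

def pvWitness_checkRuns : List (List Int) × List (List Int) :=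
  ([[5, 0], [6, 1], [7, 0]], [[5, 0], [6, -1], [4, 2]])

def Spec_checkRuns (hand : List (List Int)) (playableCards : List (List Int)) (out : List (List Int)) : Prop := out = checkRuns_alt hand playableCards
instance (hand : List (List Int)) (playableCards : List (List Int)) (out : List (List Int)) : Decidable (Spec_checkRuns hand playableCards out) := by unfold Spec_checkRuns; infer_instance

-- ===== CLAIM (what is proved, stated in full; the proofs are below) =====
def Claim_equal_checkRuns : Prop := ∀ (hand : List (List Int)) (playableCards : List (List Int)), Dom_checkRuns hand playableCards → Pre_checkRuns hand playableCards → Spec_checkRuns hand playableCards (checkRuns hand playableCards)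

-- ===== LEMMAS AND PROOFS =====

-- the run loop only ever appends at the end
lemma pvRunLoop_append (hand : List (List Int)) :
    ∀ (f : Nat) (cards : List (List Int)), ∃ t, pvRunLoop hand f cards = cards ++ t := by
  intro f
  induction f with
  | zero => intro cards; exact ⟨[], by simp [pvRunLoop]⟩
  | succ f ih =>
    intro cards
    unfold pvRunLoop
    cases h : pvFindNext hand (pvVal ((PySem.List.pyGet? cards (-1)).getD [])) with
    | none => exact ⟨[], by simp⟩
    | some card =>
      obtain ⟨t, ht⟩ := ih (cards ++ [card])
      exact ⟨card :: t, by simp [ht]⟩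

lemma pvFindNext_some (hand : List (List Int)) (v : Int) (c : List Int)
    (h : pvFindNext hand v = some c) : c ∈ hand ∧ pvVal c = v + 1 := by
  refine ⟨List.mem_of_find?_eq_some h, ?_⟩
  have := List.find?_some h
  simpa using this

lemma pvFindNext_none_iff (hand : List (List Int)) (v : Int) :
    pvFindNext hand v = none ↔ (v + 1) ∉ hand.map pvVal := by
  simp [pvFindNext, List.find?_eq_none, List.mem_map]

-- the characterisation of A's loop: the run exceeds length 2 iff v+1 and v+2 are hand values
lemma pvRun_gt_two_iff (hand : List (List Int)) (pc : List Int) :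
    2 < (pvRunLoop hand (hand.length + 1) [pc]).length ↔
      ((pvVal pc + 1) ∈ hand.map pvVal ∧ (pvVal pc + 2) ∈ hand.map pvVal) := by
  unfold pvRunLoop
  have hlast : (PySem.List.pyGet? [pc] (-1)).getD [] = pc := by simp [PySem.List.pyGet?_neg_one]
  rw [hlast]
  cases h1 : pvFindNext hand (pvVal pc) with
  | none =>
    have := (pvFindNext_none_iff hand (pvVal pc)).1 h1
    simp [this]
  | some c1 =>
    dsimp only
    obtain ⟨hc1mem, hc1val⟩ := pvFindNext_some _ _ _ h1
    obtain ⟨m, hm⟩ : ∃ m, hand.length = m + 1 := by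
      have : 0 < hand.length := List.length_pos_of_mem hc1mem
      exact ⟨hand.length - 1, by omega⟩
    rw [hm]
    have hlast2 : (PySem.List.pyGet? ([pc] ++ [c1]) (-1)).getD [] = c1 := by
      simp [PySem.List.pyGet?_neg_one]
    unfold pvRunLoop
    rw [hlast2]
    cases h2 : pvFindNext hand (pvVal c1) with
    | none =>
      dsimp only
      have hnot := (pvFindNext_none_iff hand (pvVal c1)).1 h2
      rw [hc1val] at hnot
      have : pvVal pc + 1 + 1 = pvVal pc + 2 := by ring
      rw [this] at hnot
      simp [hnot]
    | some c2 =>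
      dsimp only
      obtain ⟨hc2mem, hc2val⟩ := pvFindNext_some _ _ _ h2
      obtain ⟨t, ht⟩ := pvRunLoop_append hand m (([pc] ++ [c1]) ++ [c2])
      rw [ht]
      have h1' : pvVal pc + 1 ∈ hand.map pvVal := hc1val ▸ List.mem_map_of_mem (f := pvVal) hc1mem
      have h2' : pvVal pc + 2 ∈ hand.map pvVal := by
        have := List.mem_map_of_mem (f := pvVal) hc2mem
        rw [hc2val, hc1val] at this
        have heq : pvVal pc + 1 + 1 = pvVal pc + 2 := by ring
        rwa [heq] at this
      simp [h1', h2']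

-- the head of the run is the playable card itself
lemma pvRun_head (hand : List (List Int)) (pc : List Int) (f : Nat) :
    (PySem.List.pyGet? (pvRunLoop hand f [pc]) 0).getD [] = pc := by
  obtain ⟨t, ht⟩ := pvRunLoop_append hand f [pc]
  simp [ht]

-- A's loop body, rewritten as B's single filter test
lemma pvBody_eq (hand : List (List Int)) (runs : List (List Int)) (pc : List Int) :
    (if (PySem.List.pyGet? pc 1).getD 0 ≠ -1 then
       (if 2 < (pvRunLoop hand (hand.length + 1) [pc]).length
        then runs ++ [(PySem.List.pyGet? (pvRunLoop hand (hand.length + 1) [pc]) 0).getD []]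
        else runs)
     else runs)
    = if (((PySem.List.pyGet? pc 1).getD 0 != -1)
          && PySem.Set.contains (PySem.Set.ofList (hand.map (fun c => (PySem.List.pyGet? c 0).getD 0))) ((PySem.List.pyGet? pc 0).getD 0 + 1)
          && PySem.Set.contains (PySem.Set.ofList (hand.map (fun c => (PySem.List.pyGet? c 0).getD 0))) ((PySem.List.pyGet? pc 0).getD 0 + 2))
      then runs ++ [pc] else runs := by
  have hmapeq : hand.map (fun c => (PySem.List.pyGet? c 0).getD 0) = hand.map pvVal := rfl
  rw [hmapeq]
  have hcont : ∀ x : Int, PySem.Set.contains (PySem.Set.ofList (hand.map pvVal)) x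
      = decide (x ∈ hand.map pvVal) := by
    intro x
    by_cases hx : x ∈ hand.map pvVal
    · simp [hx]
    · simp [hx]
  rw [hcont, hcont, pvRun_head]
  by_cases hp : (PySem.List.pyGet? pc 1).getD 0 = -1
  · simp [hp]
  · rw [if_pos hp]
    by_cases hr : 2 < (pvRunLoop hand (hand.length + 1) [pc]).length
    · obtain ⟨hm1, hm2⟩ := (pvRun_gt_two_iff hand pc).1 hr
      rw [if_pos hr]
      have hb1 : ((PySem.List.pyGet? pc 1).getD 0 != -1) = true := by simp [hp]
      have hb2 : decide ((PySem.List.pyGet? pc 0).getD 0 + 1 ∈ List.map pvVal hand) = true :=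
        decide_eq_true hm1
      have hb3 : decide ((PySem.List.pyGet? pc 0).getD 0 + 2 ∈ List.map pvVal hand) = true :=
        decide_eq_true hm2
      rw [hb1, hb2, hb3]
      simp
    · rw [if_neg hr]
      have hnot := (pvRun_gt_two_iff hand pc).not.1 hr
      rw [not_and_or] at hnot
      rcases hnot with h | h
      · have hb : decide ((PySem.List.pyGet? pc 0).getD 0 + 1 ∈ List.map pvVal hand) = false :=
          decide_eq_false h
        rw [hb]
        simp
      · have hb : decide ((PySem.List.pyGet? pc 0).getD 0 + 2 ∈ List.map pvVal hand) = false :=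
          decide_eq_false h
        rw [hb]
        simp

-- ===== VERDICT (by name: the statement is the Claim_ definition above) =====
theorem checkRuns_spec : Claim_equal_checkRuns := by
  intro hand playableCards _ _
  unfold Spec_checkRuns checkRuns checkRuns_alt
  have hfun : (fun (runs : List (List Int)) (playableCard : List Int) =>
      if (PySem.List.pyGet? playableCard 1).getD 0 ≠ -1 then
        let cards := pvRunLoop hand (hand.length + 1) [playableCard]
        if 2 < cards.length then runs ++ [(PySem.List.pyGet? cards 0).getD []] else runs
      else runs)
      = (fun (runs : List (List Int)) (pc : List Int) =>
        if (((PySem.List.pyGet? pc 1).getD 0 != -1)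
            && PySem.Set.contains (PySem.Set.ofList (hand.map (fun c => (PySem.List.pyGet? c 0).getD 0))) ((PySem.List.pyGet? pc 0).getD 0 + 1)
            && PySem.Set.contains (PySem.Set.ofList (hand.map (fun c => (PySem.List.pyGet? c 0).getD 0))) ((PySem.List.pyGet? pc 0).getD 0 + 2))
        then runs ++ [pc] else runs) := by
    funext runs pc
    exact pvBody_eq hand runs pc
  rw [hfun, PySem.List.foldl_append_if_eq_filter]
  simp
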